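-- pv_equiv track=rewrite | github.com/bestxsc/NerualNetwork4Evaluation | getData.py | myFormat
-- ===== SOURCE A (Python) =====
-- def myFormat(row):
--     L = []
--     for item in row:
--         length = len(item)
--         i = 0
--         str = ""
--         while i<length:
--             if(item[i]=='.'):
--                 break
--             if(item[i]=='-'):
--                 str = '0'
--                 break
--             str += item[i]
--             i+=1
--         L.append(str)
--     return L
-- ===== SOURCE B (Python) =====
-- def myFormat(row):
--     def fmt(item):
--         head = item.split('.', 1)[0]
--         return '0' if '-' in head else head
--     return [fmt(item) for item in row]
-- ===== Notes on version B (the rewrite author's own statement) =====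
-- stated objective: simpler
-- what changed: Replaces the fused per-character while-loop (accumulator + break) by split('.',1)[0] to take the pre-dot prefix, followed by a separate '-' membership test on that prefix, as a list comprehension.
import Mathlib
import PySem

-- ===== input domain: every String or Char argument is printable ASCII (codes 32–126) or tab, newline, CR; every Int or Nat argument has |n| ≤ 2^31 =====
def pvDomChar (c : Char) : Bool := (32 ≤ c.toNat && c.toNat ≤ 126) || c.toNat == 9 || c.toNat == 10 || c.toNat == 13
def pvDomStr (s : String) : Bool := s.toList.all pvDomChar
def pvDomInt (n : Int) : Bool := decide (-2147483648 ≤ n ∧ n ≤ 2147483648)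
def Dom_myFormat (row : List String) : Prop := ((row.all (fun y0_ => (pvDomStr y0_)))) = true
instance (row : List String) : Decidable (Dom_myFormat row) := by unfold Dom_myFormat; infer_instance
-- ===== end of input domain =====

-- B replaces A's fused per-character while-loop (accumulator + break) by taking the
-- pre-dot prefix and a separate '-' membership test on it ('simpler' objective).

-- ===== PORT A =====
-- the while loop over item's characters: builds str until '.' (break) or '-' (str='0', break)
def myFormatLoopA : List Char → String → String
  | [], s => s
  | c :: cs, s =>
    if c = '.' then s
    else if c = '-' then "0"
    else myFormatLoopA cs (s ++ c.toString)

def myFormat (row : List String) : List String :=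
  row.foldl (fun L item => L ++ [myFormatLoopA item.toList ""]) []

-- ===== PORT B =====
-- head = item.split('.', 1)[0] is the substring before the first dot (takeWhile, exact for ASCII);
-- then '0' if '-' in head else head
def myFormatFmtB (item : String) : String :=
  let head := item.toList.takeWhile (fun c => c ≠ '.')
  if head.contains '-' then "0" else String.ofList head

def myFormat_alt (row : List String) : List String :=
  row.map myFormatFmtB

-- ===== PRECONDITION & SPEC =====
def Spec_myFormat (row : List String) (out : List String) : Prop := out = myFormat_alt row
instance (row : List String) (out : List String) : Decidable (Spec_myFormat row out) := by unfold Spec_myFormat; infer_instance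

-- ===== CLAIM (what is proved, stated in full; the proofs are below) =====
def Claim_equal_myFormat : Prop := ∀ (row : List String), Dom_myFormat row → Spec_myFormat row (myFormat row)

-- ===== LEMMAS AND PROOFS =====

theorem pv_append_mk_nil (s : String) : s ++ String.ofList [] = s := by
  simp

theorem pv_append_char (c : Char) (l : List Char) :
    c.toString ++ String.ofList l = String.ofList (c :: l) := by
  rw [show (c :: l) = [c] ++ l from rfl, String.ofList_append]; rfl

theorem loopA_eq (cs : List Char) (s : String) :
    myFormatLoopA cs s =
      (let head := cs.takeWhile (fun c => c ≠ '.')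
       if head.contains '-' then "0" else s ++ String.ofList head) := by
  induction cs generalizing s with
  | nil => simpa [myFormatLoopA] using (pv_append_mk_nil s).symm
  | cons c cs ih =>
    simp only [myFormatLoopA]
    by_cases hdot : c = '.'
    · simpa [hdot, List.takeWhile] using (pv_append_mk_nil s).symm
    · by_cases hneg : c = '-'
      · simp [hneg, List.takeWhile]
      · simp only [hdot, hneg, if_false, ih]
        simp only [List.takeWhile]
        have hd : (decide (c ≠ '.')) = true := by simpa using hdot
        have hc : ('-' == c) = false := by
          simp only [beq_eq_false_iff_ne]; exact fun e => hneg e.symm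
        simp only [hd, List.contains_cons, hc, Bool.false_or]
        split
        · rfl
        · rw [String.append_assoc, pv_append_char]

theorem fmt_eq (item : String) : myFormatLoopA item.toList "" = myFormatFmtB item := by
  rw [loopA_eq, myFormatFmtB]
  simp only []
  split
  · rfl
  · exact String.empty_append

theorem foldl_append_map (row : List String) (acc : List String) :
    row.foldl (fun L item => L ++ [myFormatLoopA item.toList ""]) acc
      = acc ++ row.map myFormatFmtB := by
  induction row generalizing acc with
  | nil => simp
  | cons x xs ih => rw [List.foldl, ih, fmt_eq]; simp

-- ===== VERDICT (by name: the statement is the Claim_ definition above) =====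
theorem myFormat_spec : Claim_equal_myFormat := by
  intro row _
  unfold Spec_myFormat myFormat myFormat_alt
  simpa using foldl_append_map row []
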